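-- pv_equiv track=rewrite | github.com/ukiran75/DataMining | Hunt's Algorithm using GINI.py | checkPurity
-- ===== SOURCE A (Python) =====
-- transactionData=[('n','n','c','l'),(1,0,125,0),(0,1,100,0),(0,0,70,0),(1,1,120,0),(0,2,95,1),
--               (0,1,60,0),(1,2,220,0),(0,0,85,1),(0,1,75,0),(0,0,90,1)]
--
-- def checkPurity(checkData):
--     zeroCount=0;oneCount=0
--     length = len(transactionData[0]) - 1
--     if(len(checkData)==0):
--         return -1
--     for data in checkData:
--       if(data[length]==0):
--         zeroCount+=1
--       elif(data[length]==1):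
--         oneCount+=1
--     if(len(checkData)==zeroCount):
--         return 0
--     elif(len(checkData)==oneCount):
--         return 1
--     else:
--         return 2
-- ===== SOURCE B (Python) =====
-- transactionData=[('n','n','c','l'),(1,0,125,0),(0,1,100,0),(0,0,70,0),(1,1,120,0),(0,2,95,1),
--               (0,1,60,0),(1,2,220,0),(0,0,85,1),(0,1,75,0),(0,0,90,1)]
--
-- def checkPurity(checkData):
--     if not checkData:
--         return -1
--     length = len(transactionData[0]) - 1
--     v = checkData[0][length]
--     for row in checkData[1:]:
--         if row[length] != v:
--             return 2          # early exit on first mismatching label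
--     # all labels equal v
--     if v == 0:
--         return 0
--     if v == 1:
--         return 1
--     return 2
-- ===== Notes on version B (the rewrite author's own statement) =====
-- stated objective: alternative
-- what changed: Instead of aggregating zero/one counters over the whole list and comparing them to the length, B takes the first row's label and scans the tail with an early exit on the first mismatch, then classifies that single label; it maintains no counts or containers.
import Mathlib
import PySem

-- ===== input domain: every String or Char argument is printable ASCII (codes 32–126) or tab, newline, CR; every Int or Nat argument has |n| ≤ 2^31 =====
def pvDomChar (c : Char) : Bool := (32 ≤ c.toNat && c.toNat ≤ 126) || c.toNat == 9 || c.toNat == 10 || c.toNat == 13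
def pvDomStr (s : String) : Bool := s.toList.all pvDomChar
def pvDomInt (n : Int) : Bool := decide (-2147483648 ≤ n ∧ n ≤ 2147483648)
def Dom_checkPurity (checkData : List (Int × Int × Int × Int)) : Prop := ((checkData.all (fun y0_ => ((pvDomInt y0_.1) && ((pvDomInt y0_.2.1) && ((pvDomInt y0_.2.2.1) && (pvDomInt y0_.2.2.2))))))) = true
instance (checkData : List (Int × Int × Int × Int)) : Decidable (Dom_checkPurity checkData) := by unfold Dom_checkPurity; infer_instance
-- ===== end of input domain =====

-- B drops A's zero/one counters: it compares every label against the first row's label,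
-- exiting on the first mismatch, then classifies that single label; objective: alternative.

-- ===== PORT A =====
-- length = len(transactionData[0]) - 1 = 3, so data[length] is the 4th component (.2.2.2)
def checkPurity (checkData : List (Int × Int × Int × Int)) : Int :=
  -- zeroCount=0; oneCount=0; the for-loop is a foldl over the (zeroCount, oneCount) state
  if checkData.length = 0 then -1
  else
    let zo := checkData.foldl
      (fun (zo : Int × Int) data =>
        if data.2.2.2 = 0 then (zo.1 + 1, zo.2)
        else if data.2.2.2 = 1 then (zo.1, zo.2 + 1)
        else zo) (0, 0)
    if (checkData.length : Int) = zo.1 then 0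
    else if (checkData.length : Int) = zo.2 then 1
    else 2

-- ===== PORT B =====
-- the for-loop with its early 'return 2' and the trailing classification of v
def bScan (v : Int) : List (Int × Int × Int × Int) → Int
  | [] => if v = 0 then 0 else if v = 1 then 1 else 2
  | row :: rest => if row.2.2.2 ≠ v then 2 else bScan v rest

def checkPurity_alt (checkData : List (Int × Int × Int × Int)) : Int :=
  match checkData with
  | [] => -1
  | x :: rest => bScan x.2.2.2 rest   -- v = checkData[0][3]; scan checkData[1:]

-- ===== PRECONDITION & SPEC =====
def Spec_checkPurity (checkData : List (Int × Int × Int × Int)) (out : Int) : Prop := out = checkPurity_alt checkData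
instance (checkData : List (Int × Int × Int × Int)) (out : Int) : Decidable (Spec_checkPurity checkData out) := by unfold Spec_checkPurity; infer_instance

-- ===== CLAIM (what is proved, stated in full; the proofs are below) =====
def Claim_equal_checkPurity : Prop := ∀ (checkData : List (Int × Int × Int × Int)), Dom_checkPurity checkData → Spec_checkPurity checkData (checkPurity checkData)

-- ===== LEMMAS AND PROOFS =====

-- A's loop computes (zeroCount, oneCount) = (#labels = 0, #labels = 1) on top of the initial state
theorem checkPurity_fold_count (l : List (Int × Int × Int × Int)) (a b : Int) :
    l.foldl (fun (zo : Int × Int) data =>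
        if data.2.2.2 = 0 then (zo.1 + 1, zo.2)
        else if data.2.2.2 = 1 then (zo.1, zo.2 + 1)
        else zo) (a, b)
      = (a + l.countP (fun d => d.2.2.2 == 0), b + l.countP (fun d => d.2.2.2 == 1)) := by
  induction l generalizing a b with
  | nil => simp
  | cons x xs ih =>
    by_cases h0 : x.2.2.2 = 0
    · simp [h0, ih]; try ring
    · by_cases h1 : x.2.2.2 = 1
      · simp [h1, ih]; ring
      · simp [h0, h1, ih]

-- countP = length iff every element satisfies the predicate (Int-cast form used by A's test)
theorem count_eq_length_iff (l : List (Int × Int × Int × Int)) (v : Int) :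
    ((l.length : Int) = (0 : Int) + l.countP (fun d => d.2.2.2 == v))
      ↔ ∀ d ∈ l, d.2.2.2 = v := by
  rw [zero_add]
  have hle := List.countP_le_length (p := fun d : Int × Int × Int × Int => d.2.2.2 == v) (l := l)
  constructor
  · intro h d hd
    have : l.countP (fun d => d.2.2.2 == v) = l.length := by omega
    have := (List.countP_eq_length).mp this d hd
    simpa using this
  · intro h
    have : l.countP (fun d => d.2.2.2 == v) = l.length :=
      List.countP_eq_length.mpr (fun d hd => by simpa using h d hd)
    omega

-- B's scan: early exit iff some label differs from v, else the classification of v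
theorem bScan_eq (v : Int) (l : List (Int × Int × Int × Int)) :
    bScan v l = if ∀ d ∈ l, d.2.2.2 = v then
        (if v = 0 then 0 else if v = 1 then 1 else 2) else 2 := by
  induction l with
  | nil => simp [bScan]
  | cons x xs ih =>
    by_cases hx : x.2.2.2 = v
    · have : (∀ d ∈ x :: xs, d.2.2.2 = v) ↔ (∀ d ∈ xs, d.2.2.2 = v) := by
        constructor
        · intro h d hd; exact h d (List.mem_cons_of_mem _ hd)
        · intro h d hd
          rcases List.mem_cons.mp hd with rfl | hd
          · exact hx
          · exact h d hd
      rw [bScan, if_neg (by simp [hx]), ih]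
      simp only [this]
    · simp [bScan, hx]

theorem checkPurity_eq_alt (checkData : List (Int × Int × Int × Int)) :
    checkPurity checkData = checkPurity_alt checkData := by
  match checkData with
  | [] => rfl
  | x :: rest =>
    unfold checkPurity checkPurity_alt
    simp only [List.length_cons, Nat.succ_ne_zero, if_false, checkPurity_fold_count,
      bScan_eq]
    set L := x :: rest with hL
    rw [show ((rest.length + 1 : Nat) : Int) = ((L.length : Nat) : Int) by simp [hL]]
    by_cases h0 : ∀ d ∈ L, d.2.2.2 = 0
    · have hx0 : x.2.2.2 = 0 := h0 x (by simp [hL])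
      have hr : ∀ d ∈ rest, d.2.2.2 = x.2.2.2 := fun d hd => by
        rw [h0 d (by simp [hL, hd]), hx0]
      rw [if_pos ((count_eq_length_iff L 0).mpr h0), if_pos hr, if_pos hx0]
    · rw [if_neg (fun hc => h0 ((count_eq_length_iff L 0).mp hc))]
      by_cases h1 : ∀ d ∈ L, d.2.2.2 = 1
      · have hx1 : x.2.2.2 = 1 := h1 x (by simp [hL])
        have hr : ∀ d ∈ rest, d.2.2.2 = x.2.2.2 := fun d hd => by
          rw [h1 d (by simp [hL, hd]), hx1]
        have hx0 : x.2.2.2 ≠ 0 := by rw [hx1]; decide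
        rw [if_pos ((count_eq_length_iff L 1).mpr h1), if_pos hr, if_neg hx0, if_pos hx1]
      · rw [if_neg (fun hc => h1 ((count_eq_length_iff L 1).mp hc))]
        by_cases hr : ∀ d ∈ rest, d.2.2.2 = x.2.2.2
        · have hx0 : x.2.2.2 ≠ 0 := fun hx => h0 (fun d hd => by
            rcases (by simpa [hL] using hd : d = x ∨ d ∈ rest) with h | h
            · rw [h, hx]
            · rw [hr d h, hx])
          have hx1 : x.2.2.2 ≠ 1 := fun hx => h1 (fun d hd => by
            rcases (by simpa [hL] using hd : d = x ∨ d ∈ rest) with h | h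
            · rw [h, hx]
            · rw [hr d h, hx])
          rw [if_pos hr, if_neg hx0, if_neg hx1]
        · rw [if_neg hr]

-- ===== VERDICT (by name: the statement is the Claim_ definition above) =====
theorem checkPurity_spec : Claim_equal_checkPurity := by
  intro checkData _
  exact checkPurity_eq_alt checkData
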